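-- pv_equiv track=rewrite | github.com/xingty/bing_tgbot | session.py | load_and_filter
-- ===== SOURCE A (Python) =====
-- def load_and_filter(messages):
-- 	history = []
-- 	for item in reversed(messages):
-- 		if item['role'] == 'breaker':
-- 			break
--
-- 		history.append(item)
--
-- 	history.reverse()
-- 	return history
-- ===== SOURCE B (Python) =====
-- def load_and_filter(messages):
-- 	idx = -1
-- 	for i in range(len(messages) - 1, -1, -1):
-- 		if messages[i]['role'] == 'breaker':
-- 			idx = i
-- 			break
-- 	return list(messages[idx + 1:])
-- ===== Notes on version B (the rewrite author's own statement) =====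
-- stated objective: simpler
-- what changed: Replaces A's reversed-iteration accumulate-then-reverse loop with a forward pass that records the index of the last 'breaker' item and a single slice messages[idx+1:].
import Mathlib
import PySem

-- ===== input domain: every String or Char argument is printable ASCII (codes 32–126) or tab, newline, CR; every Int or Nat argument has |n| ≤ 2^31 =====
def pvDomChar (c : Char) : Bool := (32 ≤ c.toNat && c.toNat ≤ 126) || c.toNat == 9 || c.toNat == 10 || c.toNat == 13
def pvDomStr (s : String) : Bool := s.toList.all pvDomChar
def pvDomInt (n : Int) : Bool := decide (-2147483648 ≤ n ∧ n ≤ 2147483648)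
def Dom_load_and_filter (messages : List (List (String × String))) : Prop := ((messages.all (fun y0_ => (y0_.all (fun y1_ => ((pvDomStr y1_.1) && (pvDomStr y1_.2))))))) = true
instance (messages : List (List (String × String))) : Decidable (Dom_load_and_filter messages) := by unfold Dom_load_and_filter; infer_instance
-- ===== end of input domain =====

-- B replaces A's reverse-iterate-accumulate-then-reverse loop with a locate-boundary-then-slice
-- decomposition: find the index of the last 'breaker' item, then slice messages[idx+1:]
-- (objective: simpler). A mutates no argument; equivalence is about the return value.

-- ===== PORT A =====
-- A's loop over reversed(messages), appending until a breaker; item['role'] is modelled with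
-- getD "" — exact on Pre_ (where Python's item['role'] does not raise KeyError).
def pvLfGo : List (List (String × String)) → List (List (String × String)) → List (List (String × String))
  | [], hist => hist
  | item :: rest, hist =>
    if (PySem.Dict.mk item).getD "role" "" = "breaker" then hist
    else pvLfGo rest (hist ++ [item])

def load_and_filter (messages : List (List (String × String))) : List (List (String × String)) :=
  (pvLfGo messages.reverse []).reverse

-- ===== PORT B =====
-- B's 'for i in range(len(messages)-1, -1, -1): … break' with messages[i]['role'] modelled the
-- same way (pyGetD is exact here: every range index is in range; getD "" exact on Pre_).
def pvFindGo (messages : List (List (String × String))) : List Int → Int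
  | [] => -1
  | i :: rest =>
    if (PySem.Dict.mk (PySem.List.pyGetD messages i [])).getD "role" "" = "breaker" then i
    else pvFindGo messages rest

def load_and_filter_alt (messages : List (List (String × String))) : List (List (String × String)) :=
  let idx : Int := pvFindGo messages (PySem.List.pyRange ((messages.length : Int) - 1) (-1) (-1))
  PySem.List.slice messages (some (idx + 1)) none

-- ===== PRECONDITION & SPEC =====
-- Pre_ excludes exactly the inputs where Python A (and Python B alike) raises KeyError:
-- some item has no 'role' key and no later item's role is 'breaker'.
def Pre_load_and_filter (messages : List (List (String × String))) : Prop :=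
  ∀ j : Fin messages.length, (PySem.Dict.mk messages[j]).contains "role" = false →
    ∃ k : Fin messages.length, (j : Nat) < (k : Nat) ∧
      (PySem.Dict.mk messages[k]).get? "role" = some "breaker"
instance (messages : List (List (String × String))) : Decidable (Pre_load_and_filter messages) := by unfold Pre_load_and_filter; infer_instance

def pvWitness_load_and_filter : (List (List (String × String))) := [[("role", "user")]]

def Spec_load_and_filter (messages : List (List (String × String))) (out : List (List (String × String))) : Prop := out = load_and_filter_alt messages
instance (messages : List (List (String × String))) (out : List (List (String × String))) : Decidable (Spec_load_and_filter messages out) := by unfold Spec_load_and_filter; infer_instance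

-- ===== CLAIM (what is proved, stated in full; the proofs are below) =====
def Claim_equal_load_and_filter : Prop := ∀ (messages : List (List (String × String))), Dom_load_and_filter messages → Pre_load_and_filter messages → Spec_load_and_filter messages (load_and_filter messages)

-- ===== LEMMAS AND PROOFS =====

-- A's loop accumulates the longest breaker-free suffix, read backwards
theorem pvLfGo_eq (r hist : List (List (String × String))) :
    pvLfGo r hist = hist ++ r.takeWhile (fun i => !decide ((PySem.Dict.mk i).getD "role" "" = "breaker")) := by
  induction r generalizing hist with
  | nil => simp [pvLfGo]
  | cons item rest ih =>
    simp only [pvLfGo, List.takeWhile]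
    by_cases h : (PySem.Dict.mk item).getD "role" "" = "breaker"
    · simp [h]
    · rw [if_neg h, ih]
      simp [h]

-- range(n-1, -1, -1) is [n-1, n-2, …, 0]
theorem pvRange_desc (n : Nat) :
    PySem.List.pyRange ((n : Int) - 1) (-1) (-1) = (List.range n).map (fun k : Nat => (n : Int) - 1 - (k : Int)) := by
  unfold PySem.List.pyRange
  cases n with
  | zero => norm_num
  | succ m =>
    have h1 : ¬((-1 : Int) = 0) := by norm_num
    have h2 : ¬((0 : Int) < -1) := by norm_num
    have h3 : (-1 : Int) < (↑(m + 1) : Int) - 1 := by push_cast; omega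
    have h4 : ((↑(m + 1) : Int) - 1 - (-1) + -(-1) - 1) / (-(-1)) = (↑(m + 1) : Int) := by push_cast; ring_nf; omega
    simp only [if_neg h1, if_neg h2, if_pos h3, h4]
    have h5 : ((↑(m + 1) : Int)).toNat = m + 1 := by omega
    rw [h5]
    refine List.map_congr_left ?_
    intro k _
    ring

-- appending one item does not change the scan over indices below the old length
theorem pvFindGo_append (l : List (List (String × String))) (x : List (String × String))
    (r : List Int) (h : ∀ i ∈ r, 0 ≤ i ∧ i < l.length) :
    pvFindGo (l ++ [x]) r = pvFindGo l r := by
  induction r with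
  | nil => rfl
  | cons i rest ih =>
    obtain ⟨h0, hlt⟩ := h i (List.mem_cons_self ..)
    have hi : i = ((i.toNat : Nat) : Int) := by omega
    have hget : PySem.List.pyGetD (l ++ [x]) i [] = PySem.List.pyGetD l i [] := by
      rw [hi, PySem.List.pyGetD_natCast, PySem.List.pyGetD_natCast,
        List.getD_eq_getElem?_getD, List.getD_eq_getElem?_getD,
        List.getElem?_append_left (by omega)]
    simp only [pvFindGo, hget]
    split
    · rfl
    · exact ih (fun j hj => h j (List.mem_cons_of_mem _ hj))

-- the scan returns -1 or one of its indices
theorem pvFindGo_mem (m : List (List (String × String))) (r : List Int) :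
    pvFindGo m r = -1 ∨ pvFindGo m r ∈ r := by
  induction r with
  | nil => left; rfl
  | cons i rest ih =>
    simp only [pvFindGo]
    split
    · right; exact List.mem_cons_self ..
    · rcases ih with h | h
      · left; exact h
      · right; exact List.mem_cons_of_mem _ h

def pvIdx (messages : List (List (String × String))) : Int :=
  pvFindGo messages (PySem.List.pyRange ((messages.length : Int) - 1) (-1) (-1))

theorem pvIdx_append (l : List (List (String × String))) (x : List (String × String)) :
    pvIdx (l ++ [x]) =
      if (PySem.Dict.mk x).getD "role" "" = "breaker" then (l.length : Int) else pvIdx l := by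
  unfold pvIdx
  rw [List.length_append, List.length_singleton, pvRange_desc, List.range_succ_eq_map,
    List.map_cons, List.map_map]
  have hmap : (List.range l.length).map ((fun k : Nat => ((l.length + 1 : Nat) : Int) - 1 - (k : Int)) ∘ Nat.succ)
      = (List.range l.length).map (fun k : Nat => (l.length : Int) - 1 - (k : Int)) := by
    refine List.map_congr_left ?_
    intro k _
    simp only [Function.comp]
    push_cast
    ring
  have hhead : ((l.length + 1 : Nat) : Int) - 1 - ((0 : Nat) : Int) = (l.length : Int) := by
    push_cast; ring
  rw [hmap, hhead]
  have hget : PySem.List.pyGetD (l ++ [x]) (l.length : Int) [] = x := by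
    rw [PySem.List.pyGetD_natCast, List.getD_eq_getElem?_getD, List.getElem?_append_right le_rfl]
    simp
  simp only [pvFindGo, hget]
  split
  · rfl
  · rw [pvFindGo_append l x _ (by
      intro i hi
      obtain ⟨k, hk, rfl⟩ := List.mem_map.mp hi
      have := List.mem_range.mp hk
      omega), ← pvRange_desc]

theorem pvIdx_bounds (l : List (List (String × String))) :
    -1 ≤ pvIdx l ∧ pvIdx l < l.length := by
  rcases pvFindGo_mem l (PySem.List.pyRange ((l.length : Int) - 1) (-1) (-1)) with h | h
  · unfold pvIdx
    rw [h]
    constructor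
    · omega
    · have := l.length.cast_nonneg (α := Int); omega
  · rw [pvRange_desc] at h
    obtain ⟨k, hk, hkeq⟩ := List.mem_map.mp h
    have := List.mem_range.mp hk
    unfold pvIdx
    rw [pvRange_desc, ← hkeq]
    omega

-- B's boundary index cuts off exactly the suffix A's backward scan keeps
theorem pvDrop_eq (l : List (List (String × String))) :
    List.drop (pvIdx l + 1).toNat l =
      (l.reverse.takeWhile (fun i => !decide ((PySem.Dict.mk i).getD "role" "" = "breaker"))).reverse := by
  induction l using List.reverseRecOn with
  | nil => simp [pvIdx, pvFindGo, PySem.List.pyRange]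
  | append_singleton l x ih =>
    rw [pvIdx_append, List.reverse_append]
    by_cases h : (PySem.Dict.mk x).getD "role" "" = "breaker"
    · rw [if_pos h]
      have hc : ((l.length : Int) + 1).toNat = l.length + 1 := by omega
      simp [hc, h, List.drop_eq_nil_of_le]
    · rw [if_neg h]
      have hb := pvIdx_bounds l
      have hle : (pvIdx l + 1).toNat ≤ l.length := by omega
      rw [List.drop_append_of_le_length hle, ih]
      simp [h]

theorem pvEq (messages : List (List (String × String))) :
    load_and_filter messages = load_and_filter_alt messages := by
  show (pvLfGo messages.reverse []).reverse = _
  rw [pvLfGo_eq, List.nil_append]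
  unfold load_and_filter_alt
  have hb := pvIdx_bounds messages
  have hcast : pvIdx messages + 1 = ((pvIdx messages + 1).toNat : Int) := by omega
  show _ = PySem.List.slice messages (some (pvIdx messages + 1)) none
  rw [hcast, PySem.List.slice_from_natCast, pvDrop_eq]

-- ===== VERDICT (by name: the statement is the Claim_ definition above) =====
theorem load_and_filter_spec : Claim_equal_load_and_filter := by
  intro messages _ _
  exact pvEq messages
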